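-- pv_equiv track=rewrite | github.com/irenenikk/e2e-generator | generator/slug2slug_aligner.py | find_all_in_list
-- ===== SOURCE A (Python) =====
-- def find_all_in_list(val, lst):
--     indexes = []
--     positions = []
--
--     for i, elem in enumerate(lst):
--         if val == elem:
--             indexes.append(i)
--
--             # Calculate approximate character position of the matched value
--             punct_cnt = lst[:i].count('.') + lst[:i].count(',')
--             positions.append(len(' '.join(lst[:i])) + 1 - punct_cnt)
--
--     return indexes, positions
-- ===== SOURCE B (Python) =====
-- def find_all_in_list(val, lst):
--     # list.index jumps from match to match; positions come from running
--     # length/punctuation totals over the disjoint slices between matches.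
--     indexes = []
--     positions = []
--     prev = 0
--     S = 0   # sum(len(e) for e in lst[:prev])
--     p = 0   # lst[:prev].count('.') + lst[:prev].count(',')
--     start = 0
--     while True:
--         try:
--             i = lst.index(val, start)
--         except ValueError:
--             break
--         indexes.append(i)
--         seg = lst[prev:i]
--         S += sum(map(len, seg))
--         p += seg.count('.') + seg.count(',')
--         positions.append((S + i - 1 if i > 0 else 0) + 1 - p)
--         prev = i
--         start = i + 1
--     return indexes, positions
-- ===== Notes on version B (the rewrite author's own statement) =====
-- stated objective: alternative
-- what changed: B jumps from match to match with list.index and derives each position from running length/punctuation totals accumulated over the disjoint slices between consecutive matches, instead of A's per-element loop with a per-match rescan (slice, two counts and a join) of the whole prefix.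
import Mathlib
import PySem

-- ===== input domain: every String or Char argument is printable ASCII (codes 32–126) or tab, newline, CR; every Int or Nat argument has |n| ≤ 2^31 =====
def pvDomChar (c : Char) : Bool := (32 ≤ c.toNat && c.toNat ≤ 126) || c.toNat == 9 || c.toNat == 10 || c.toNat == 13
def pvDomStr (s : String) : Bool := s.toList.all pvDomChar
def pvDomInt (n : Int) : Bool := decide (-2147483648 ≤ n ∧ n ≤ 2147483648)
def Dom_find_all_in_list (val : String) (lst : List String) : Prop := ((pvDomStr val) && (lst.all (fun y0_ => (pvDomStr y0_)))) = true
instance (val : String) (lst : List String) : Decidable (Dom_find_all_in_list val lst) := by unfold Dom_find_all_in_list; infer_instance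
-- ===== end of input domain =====

-- B jumps from match to match with list.index and derives each position from running
-- length/punctuation totals over the disjoint slices between consecutive matches, instead
-- of A's per-element loop with a per-match rescan of the whole prefix (objective: alternative).

-- ===== PORT A =====
-- loop body of A: on a match, recompute lst[:i], its '.'/',' counts and the joined length
def pvStepA (val : String) (lst : List String) (acc : List Int × List Int) (p : Int × String) : List Int × List Int :=
  if val == p.2 then
    let pref := PySem.List.slice lst none (some p.1)
    let punct : Int := (PySem.List.count pref "." : Int) + (PySem.List.count pref "," : Int)
    (acc.1 ++ [p.1], acc.2 ++ [PySem.Str.len (PySem.Str.join " " pref) + 1 - punct])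
  else acc

def find_all_in_list (val : String) (lst : List String) : List Int × List Int :=
  (PySem.List.enumerate lst 0).foldl (pvStepA val lst) ([], [])

-- ===== PORT B =====
-- B's while-loop; lst.index(val, start) is ported by hand as start + index? on lst.drop start
-- (exact: Python returns the first occurrence at or after start, ValueError = none here)
def pvLoopB (val : String) (lst : List String) (start prev : Nat) (S p : Int)
    (acc1 acc2 : List Int) : List Int × List Int :=
  match h : PySem.List.index? (lst.drop start) val with
  | none => (acc1, acc2)
  | some j =>
      let i := start + j
      let seg := PySem.List.slice lst (some (prev : Int)) (some ((i : Nat) : Int))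
      let S' := S + (seg.map PySem.Str.len).sum
      let p' := p + ((PySem.List.count seg "." : Int) + (PySem.List.count seg "," : Int))
      pvLoopB val lst (i + 1) i S' p' (acc1 ++ [((i : Nat) : Int)])
        (acc2 ++ [(if 0 < ((i : Nat) : Int) then S' + (i : Nat) - 1 else 0) + 1 - p'])
termination_by lst.length - start
decreasing_by
  have := (PySem.List.index?_eq_some_iff _ _ _).mp h
  obtain ⟨pre, suf, hdec, hlen, -⟩ := this
  have hd : (lst.drop start).length = lst.length - start := List.length_drop
  rw [hdec] at hd
  simp at hd
  omega

def find_all_in_list_alt (val : String) (lst : List String) : List Int × List Int :=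
  pvLoopB val lst 0 0 0 0 [] []

-- ===== PRECONDITION & SPEC =====
def Spec_find_all_in_list (val : String) (lst : List String) (out : List Int × List Int) : Prop := out = find_all_in_list_alt val lst
instance (val : String) (lst : List String) (out : List Int × List Int) : Decidable (Spec_find_all_in_list val lst out) := by unfold Spec_find_all_in_list; infer_instance

-- ===== CLAIM (what is proved, stated in full; the proofs are below) =====
def Claim_equal_find_all_in_list : Prop := ∀ (val : String) (lst : List String), Dom_find_all_in_list val lst → Spec_find_all_in_list val lst (find_all_in_list val lst)

-- ===== LEMMAS AND PROOFS =====

-- len(' '.join(pre)) as an Int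
def pvJLen (pre : List String) : Int := PySem.Str.len (PySem.Str.join " " pre)
-- pre.count('.') + pre.count(',') as an Int
def pvPCnt (pre : List String) : Int := (PySem.List.count pre "." : Int) + (PySem.List.count pre "," : Int)
-- sum of the individual lengths
def pvSLen (pre : List String) : Int := (pre.map PySem.Str.len).sum

-- common closed form: indexes and positions of the matches of val in suf, suf sitting at offset k of lst
def pvSpec (val : String) (lst : List String) : List String → Nat → List Int × List Int
  | [], _ => ([], [])
  | e :: t, k =>
      let r := pvSpec val lst t (k + 1)
      if val == e then ((k : Int) :: r.1, (pvJLen (lst.take k) + 1 - pvPCnt (lst.take k)) :: r.2)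
      else r

lemma pvJoin_cons_cons_len (a b : String) (r : List String) :
    pvJLen (a :: b :: r) = PySem.Str.len a + 1 + pvJLen (b :: r) := by
  simp [pvJLen, PySem.Str.len_eq, PySem.Str.toList_join, PySem.Chars.join_cons_cons]
  ring

lemma pvJLen_closed : ∀ (pre : List String), pre ≠ [] → pvJLen pre = pvSLen pre + pre.length - 1 := by
  intro pre
  induction pre with
  | nil => intro h; exact absurd rfl h
  | cons a rest ih =>
      intro _
      cases rest with
      | nil => simp [pvJLen, pvSLen, PySem.Str.len_eq, PySem.Str.toList_join, PySem.Chars.join_singleton]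
      | cons b r =>
          rw [pvJoin_cons_cons_len, ih (by simp)]
          simp [pvSLen]
          ring

lemma pvJLen_take (lst : List String) (k : Nat) (hk : k ≤ lst.length) :
    (if 0 < (k : Int) then pvSLen (lst.take k) + (k : Int) - 1 else 0) = pvJLen (lst.take k) := by
  by_cases hk0 : k = 0
  · subst hk0
    simp [pvJLen, PySem.Str.len_eq, PySem.Str.toList_join, PySem.Chars.join_nil]
  · have hpos : (0 : Int) < (k : Int) := by exact_mod_cast Nat.pos_of_ne_zero hk0
    have hne : lst.take k ≠ [] := by
      have hl : (lst.take k).length = k := by rw [List.length_take]; omega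
      intro hnil; rw [hnil] at hl; simp at hl; omega
    rw [if_pos hpos, pvJLen_closed _ hne]
    have hl : ((lst.take k).length : Int) = (k : Int) := by
      rw [List.length_take]; congr 1; omega
    rw [hl]

lemma pvTake_split (lst : List String) (prev k : Nat) (h : prev ≤ k) :
    lst.take k = lst.take prev ++ (lst.drop prev).take (k - prev) := by
  rw [← List.drop_take]
  conv_lhs => rw [← List.take_append_drop prev (lst.take k)]
  congr 1
  rw [List.take_take, min_eq_left h]

lemma pvSLen_split (lst : List String) (prev k : Nat) (h : prev ≤ k) :
    pvSLen (lst.take k) = pvSLen (lst.take prev) + pvSLen ((lst.drop prev).take (k - prev)) := by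
  rw [pvTake_split lst prev k h]; simp [pvSLen]

lemma pvPCnt_split (lst : List String) (prev k : Nat) (h : prev ≤ k) :
    pvPCnt (lst.take k) = pvPCnt (lst.take prev) + pvPCnt ((lst.drop prev).take (k - prev)) := by
  rw [pvTake_split lst prev k h]
  simp [pvPCnt, PySem.List.count_eq, List.count_append]
  ring

-- A's fold computes pvSpec
lemma pvA_fold (val : String) :
    ∀ (suf pre : List String) (acc1 acc2 : List Int),
      (PySem.List.enumerate suf (pre.length : Int)).foldl (pvStepA val (pre ++ suf)) (acc1, acc2)
        = (acc1 ++ (pvSpec val (pre ++ suf) suf pre.length).1,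
           acc2 ++ (pvSpec val (pre ++ suf) suf pre.length).2) := by
  intro suf
  induction suf with
  | nil => intro pre acc1 acc2; simp [PySem.List.enumerate, pvSpec]
  | cons e t ih =>
      intro pre acc1 acc2
      rw [PySem.List.enumerate_cons]
      simp only [List.foldl_cons]
      have hsl : PySem.List.slice (pre ++ e :: t) none (some (pre.length : Int)) = pre := by
        rw [PySem.List.slice_to_natCast]; exact List.take_left
      have htk : (pre ++ e :: t).take pre.length = pre := List.take_left
      have hA : pvStepA val (pre ++ e :: t) (acc1, acc2) ((pre.length : Int), e)
          = (if val == e then (acc1 ++ [(pre.length : Int)], acc2 ++ [pvJLen pre + 1 - pvPCnt pre])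
             else (acc1, acc2)) := by
        simp only [pvStepA, hsl, pvJLen, pvPCnt]
      rw [hA]
      have hre : pre ++ e :: t = (pre ++ [e]) ++ t := by simp
      have hlen : ((pre ++ [e]).length : Int) = (pre.length : Int) + 1 := by simp
      have := ih (pre ++ [e]) (if val == e then acc1 ++ [(pre.length : Int)] else acc1)
                 (if val == e then acc2 ++ [pvJLen pre + 1 - pvPCnt pre] else acc2)
      rw [hlen, ← hre] at this
      by_cases h : val == e
      · simp only [h, if_pos] at this ⊢
        rw [this]
        simp [pvSpec, h, htk]
      · simp only [h, Bool.false_eq_true, if_neg, not_false_iff] at this ⊢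
        rw [this]
        simp [pvSpec, h]

-- no match in suf: pvSpec is empty
lemma pvSpec_of_not_mem (val : String) (lst : List String) :
    ∀ (suf : List String) (k : Nat), val ∉ suf → pvSpec val lst suf k = ([], []) := by
  intro suf
  induction suf with
  | nil => intro k _; rfl
  | cons e t ih =>
      intro k hnm
      have h1 : val ≠ e := fun h => hnm (h ▸ List.mem_cons_self)
      have h2 : val ∉ t := fun h => hnm (List.mem_cons_of_mem _ h)
      simp [pvSpec, h1, ih (k + 1) h2]

-- pvSpec skips a match-free prefix
lemma pvSpec_append (val : String) (lst : List String) :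
    ∀ (pre : List String) (rest : List String) (k : Nat), val ∉ pre →
      pvSpec val lst (pre ++ rest) k = pvSpec val lst rest (k + pre.length) := by
  intro pre
  induction pre with
  | nil => intro rest k _; simp
  | cons e t ih =>
      intro rest k hnm
      have h1 : val ≠ e := fun h => hnm (h ▸ List.mem_cons_self)
      have h2 : val ∉ t := fun h => hnm (List.mem_cons_of_mem _ h)
      have := ih rest (k + 1) h2
      simp only [List.cons_append, pvSpec, h1, beq_iff_eq, if_false, List.length_cons]
      rw [this]
      congr 1
      omega

-- B's loop computes pvSpec
lemma pvLoopB_eq (val : String) (lst : List String) :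
    ∀ (n start prev : Nat) (acc1 acc2 : List Int),
      lst.length - start ≤ n → prev ≤ start →
      pvLoopB val lst start prev (pvSLen (lst.take prev)) (pvPCnt (lst.take prev)) acc1 acc2
        = (acc1 ++ (pvSpec val lst (lst.drop start) start).1,
           acc2 ++ (pvSpec val lst (lst.drop start) start).2) := by
  intro n
  induction n with
  | zero =>
      intro start prev acc1 acc2 hn hps
      have hd : lst.drop start = [] := by
        apply List.drop_eq_nil_of_le; omega
      rw [pvLoopB]
      rw [hd]
      simp [PySem.List.index?_eq_idxOf?, pvSpec]
  | succ n ihn =>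
      intro start prev acc1 acc2 hn hps
      rw [pvLoopB]
      split
      · next hidx =>
          have hnm : val ∉ lst.drop start := (PySem.List.index?_eq_none_iff _ _).mp hidx
          rw [pvSpec_of_not_mem val lst _ start hnm]
          simp
      · next j hidx =>
          obtain ⟨pre, suf, hdec, hlen, hpnm⟩ := (PySem.List.index?_eq_some_iff _ _ _).mp hidx
          have hdl : (lst.drop start).length = lst.length - start := List.length_drop
          have hjlt : start + j < lst.length := by
            rw [hdec] at hdl; simp at hdl; omega
          have hisle : start + j ≤ lst.length := le_of_lt hjlt
          have hple : prev ≤ start + j := by omega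
          -- the updated running totals are the totals of the new prefix
          have hS : pvSLen (lst.take prev) + pvSLen ((lst.drop prev).take (start + j - prev))
              = pvSLen (lst.take (start + j)) := (pvSLen_split lst prev (start + j) hple).symm
          have hP : pvPCnt (lst.take prev) + pvPCnt ((lst.drop prev).take (start + j - prev))
              = pvPCnt (lst.take (start + j)) := (pvPCnt_split lst prev (start + j) hple).symm
          -- the spec at this point: skip pre, match at start+j
          have hdrop1 : lst.drop (start + j + 1) = suf := by
            have h1 : lst.drop (start + j + 1) = (lst.drop start).drop (j + 1) := by
              rw [List.drop_drop, Nat.add_assoc]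
            rw [h1, hdec, show pre ++ val :: suf = (pre ++ [val]) ++ suf from by simp,
                show j + 1 = (pre ++ [val]).length from by simp [← hlen]]
            exact List.drop_left
          have hspec : pvSpec val lst (lst.drop start) start
              = (((start + j : Nat) : Int) :: (pvSpec val lst suf (start + j + 1)).1,
                 (pvJLen (lst.take (start + j)) + 1 - pvPCnt (lst.take (start + j)))
                   :: (pvSpec val lst suf (start + j + 1)).2) := by
            rw [hdec, pvSpec_append val lst pre (val :: suf) start hpnm, hlen]
            simp [pvSpec]
          have hslice : PySem.List.slice lst (some (prev : Int)) (some ((start + j : Nat) : Int))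
              = (lst.drop prev).take (start + j - prev) := by
            rw [PySem.List.slice_natCast]
          -- recursive call via IH
          have hih := ihn (start + j + 1) (start + j)
            (acc1 ++ [((start + j : Nat) : Int)])
            (acc2 ++ [(if 0 < ((start + j : Nat) : Int) then
                pvSLen (lst.take (start + j)) + (start + j : Nat) - 1 else 0) + 1
                - pvPCnt (lst.take (start + j))])
            (by omega) (by omega)
          show pvLoopB val lst (start + j + 1) (start + j) _ _ _ _ = _
          rw [hslice]
          simp only [pvSLen, pvPCnt] at hS hP ⊢
          rw [hS, hP]
          simp only [pvSLen, pvPCnt] at hih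
          rw [hih, hdrop1, hspec]
          have hJ := pvJLen_take lst (start + j) hisle
          simp only [pvSLen] at hJ
          rw [hJ]
          simp [pvPCnt]

-- ===== VERDICT (by name: the statement is the Claim_ definition above) =====
theorem find_all_in_list_spec : Claim_equal_find_all_in_list := by
  intro val lst _
  unfold Spec_find_all_in_list find_all_in_list find_all_in_list_alt
  have hA := pvA_fold val lst [] [] []
  simp only [List.nil_append, List.length_nil, Nat.cast_zero] at hA
  have hB := pvLoopB_eq val lst lst.length 0 0 [] [] (by omega) (le_refl 0)
  simp only [List.take_zero, List.drop_zero, List.nil_append] at hB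
  have h0 : pvSLen ([] : List String) = 0 := by simp [pvSLen]
  have h0' : pvPCnt ([] : List String) = 0 := by simp [pvPCnt, PySem.List.count_eq]
  rw [h0, h0'] at hB
  rw [hA, hB]
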